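-- pv_equiv track=rewrite | github.com/teaishealthy/aoc25 | days/3/main.py | largest_concatenation_subsequence
-- ===== SOURCE A (Python) =====
-- def largest_concatenation_subsequence(batteries: list[int], n: int) -> int:
--     m = len(batteries)
--
--     len_one_values = batteries[:]
--
--     for length in range(2, n + 1):
--         current_values = [0] * m
--         start = length - 2
--
--         for end in range(length - 1, m):
--             battery_value = batteries[end]
--             best_value = 0
--
--             for previous_index in range(start, end):
--                 composed_value = len_one_values[previous_index] * 10 + battery_value
--                 if composed_value > best_value:
--                     best_value = composed_value
--
--             current_values[end] = best_value
--
--         len_one_values = current_values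
--     return max(len_one_values)
-- ===== SOURCE B (Python) =====
-- def largest_concatenation_subsequence(batteries: list[int], n: int) -> int:
--     m = len(batteries)
--     prev = batteries[:]
--     for length in range(2, n + 1):
--         cur = [0] * m
--         run = None
--         for end in range(length - 1, m):
--             p = prev[end - 1]
--             run = p if run is None else max(run, p)
--             cur[end] = max(0, run * 10 + batteries[end])
--         prev = cur
--     return max(prev)
-- ===== Notes on version B (the rewrite author's own statement) =====
-- stated objective: faster
-- what changed: B carries a running maximum of the previous-length DP values through the end-loop, eliminating A's inner scan over all earlier indices (O(n*m^2) -> O(n*m)).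
-- outside the precondition, e.g. on largest_concatenation_subsequence([], 3): A raises ValueError, B raises ValueError
import Mathlib
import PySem

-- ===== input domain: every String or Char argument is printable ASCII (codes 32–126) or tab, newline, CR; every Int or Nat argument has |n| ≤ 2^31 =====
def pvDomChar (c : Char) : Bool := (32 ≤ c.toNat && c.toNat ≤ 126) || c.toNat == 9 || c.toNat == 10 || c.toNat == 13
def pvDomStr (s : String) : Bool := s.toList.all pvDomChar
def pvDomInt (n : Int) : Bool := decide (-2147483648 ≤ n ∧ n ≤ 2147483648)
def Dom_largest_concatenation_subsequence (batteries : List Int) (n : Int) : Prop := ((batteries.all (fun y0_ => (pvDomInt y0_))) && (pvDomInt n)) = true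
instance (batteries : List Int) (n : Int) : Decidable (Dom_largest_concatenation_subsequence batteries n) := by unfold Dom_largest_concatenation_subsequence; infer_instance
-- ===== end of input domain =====

-- B replaces A's inner scan over all previous DP values by a running maximum carried
-- through the end-loop (O(n·m) instead of O(n·m²)); same return value wherever A returns.

-- ===== PORT A =====
-- inner loop: for previous_index in range(start, end): … running best_value
def pvA_inner (prevV : List Int) (bv start endi : Int) : Int :=
  (PySem.List.pyRange start endi 1).foldl
    (fun best pi =>
      let composed := PySem.List.pyGetD prevV pi 0 * 10 + bv
      if composed > best then composed else best) 0

-- body of 'for end in range(length - 1, m)'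
def pvA_step (batteries prevV : List Int) (length : Int) (cur : List Int) (endi : Int) : List Int :=
  let bv := PySem.List.pyGetD batteries endi 0
  PySem.List.pySetD cur endi (pvA_inner prevV bv (length - 2) endi)

-- one iteration of 'for length in range(2, n + 1)'
def pvA_len (batteries prevV : List Int) (m length : Int) : List Int :=
  (PySem.List.pyRange (length - 1) m 1).foldl (pvA_step batteries prevV length)
    (List.replicate m.toNat 0)

def largest_concatenation_subsequence (batteries : List Int) (n : Int) : Int :=
  let m : Int := PySem.List.len batteries
  let final := (PySem.List.pyRange 2 (n + 1) 1).foldl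
    (fun prevV length => pvA_len batteries prevV m length) batteries
  (PySem.List.max? final (fun x => x)).getD 0

-- ===== PORT B =====
-- body of B's 'for end in range(length - 1, m)': state is (cur, run)
def pvB_step (batteries prevV : List Int) (st : List Int × Option Int) (endi : Int) :
    List Int × Option Int :=
  let p := PySem.List.pyGetD prevV (endi - 1) 0
  let run := match st.2 with
    | none => p
    | some r => max r p
  (PySem.List.pySetD st.1 endi (max 0 (run * 10 + PySem.List.pyGetD batteries endi 0)), some run)

def pvB_len (batteries prevV : List Int) (m length : Int) : List Int :=
  ((PySem.List.pyRange (length - 1) m 1).foldl (pvB_step batteries prevV)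
    (List.replicate m.toNat 0, none)).1

def largest_concatenation_subsequence_alt (batteries : List Int) (n : Int) : Int :=
  let m : Int := PySem.List.len batteries
  let final := (PySem.List.pyRange 2 (n + 1) 1).foldl
    (fun prevV length => pvB_len batteries prevV m length) batteries
  (PySem.List.max? final (fun x => x)).getD 0

-- ===== PRECONDITION & SPEC =====
-- Pre_ excludes only the empty list, on which Python's max([]) raises ValueError (in A and in B alike).
def Pre_largest_concatenation_subsequence (batteries : List Int) (n : Int) : Prop := batteries ≠ []
instance (batteries : List Int) (n : Int) : Decidable (Pre_largest_concatenation_subsequence batteries n) := by unfold Pre_largest_concatenation_subsequence; infer_instance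
def pvWitness_largest_concatenation_subsequence : List Int × Int := ([3, 7, 2], 2)

def Spec_largest_concatenation_subsequence (batteries : List Int) (n : Int) (out : Int) : Prop := out = largest_concatenation_subsequence_alt batteries n
instance (batteries : List Int) (n : Int) (out : Int) : Decidable (Spec_largest_concatenation_subsequence batteries n out) := by unfold Spec_largest_concatenation_subsequence; infer_instance

-- ===== CLAIM (what is proved, stated in full; the proofs are below) =====
def Claim_equal_largest_concatenation_subsequence : Prop := ∀ (batteries : List Int) (n : Int), Dom_largest_concatenation_subsequence batteries n → Pre_largest_concatenation_subsequence batteries n → Spec_largest_concatenation_subsequence batteries n (largest_concatenation_subsequence batteries n)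

-- ===== LEMMAS AND PROOFS =====

-- running maximum of prev[a-1], prev[a], …, prev[a-1+k]
def pvW (g : Int → Int) (a : Int) : Nat → Int
  | 0 => g (a - 1)
  | k + 1 => max (pvW g a k) (g (a + k))

-- A's inner scan over the window [a-1, a+k) computes max(0, 10·(window max) + bv)
theorem pvA_inner_eq (prevV : List Int) (bv a : Int) (k : Nat) :
    pvA_inner prevV bv (a - 1) (a + k) =
      max 0 (pvW (fun i => PySem.List.pyGetD prevV i 0) a k * 10 + bv) := by
  induction k with
  | zero =>
      have h : a + (0 : Nat) = (a - 1) + 1 := by norm_num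
      rw [pvA_inner, h, PySem.List.pyRange_one_singleton]
      simp only [List.foldl, pvW]
      split <;> omega
  | succ k ih =>
      have h1 : (a : Int) - 1 ≤ a + k := by omega
      have h2 : a + ((k : Nat) + 1 : Nat) = (a + k) + 1 := by push_cast; ring
      rw [pvA_inner, h2, PySem.List.pyRange_one_succ_right h1, List.foldl_append]
      rw [pvA_inner] at ih
      rw [ih]
      simp only [List.foldl, pvW]
      split <;> omega

theorem pvB_fold_eq (batteries prevV : List Int) (L : Int) (k : Nat) (c0 : List Int) :
    (PySem.List.pyRange (L - 1) (L - 1 + ((k : Int) + 1)) 1).foldl (pvB_step batteries prevV) (c0, none)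
      = ((PySem.List.pyRange (L - 1) (L - 1 + ((k : Int) + 1)) 1).foldl
          (pvA_step batteries prevV L) c0,
         some (pvW (fun i => PySem.List.pyGetD prevV i 0) (L - 1) k)) := by
  induction k with
  | zero =>
      have h : (L : Int) - 1 + ((0 : Nat) + 1) = (L - 1) + 1 := by push_cast; ring
      rw [h, PySem.List.pyRange_one_singleton]
      simp only [List.foldl, pvB_step, pvA_step, pvW]
      have hw : pvA_inner prevV (PySem.List.pyGetD batteries (L - 1) 0) (L - 2) (L - 1)
          = max 0 (pvW (fun i => PySem.List.pyGetD prevV i 0) (L - 1) 0 * 10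
              + PySem.List.pyGetD batteries (L - 1) 0) := by
        have h0 : (L : Int) - 2 = (L - 1) - 1 := by ring
        have h1 : (L : Int) - 1 = (L - 1) + ((0 : Nat) : Int) := by push_cast; ring
        rw [h0, h1, ← pvA_inner_eq]
        norm_num
      rw [hw]
      simp [pvW]
  | succ k ih =>
      have h1 : (L : Int) - 1 ≤ L - 1 + ((k : Int) + 1) := by omega
      have h2 : (L : Int) - 1 + (((k : Nat) + 1 : Nat) + 1) = (L - 1 + ((k : Int) + 1)) + 1 := by
        push_cast; ring
      rw [h2, PySem.List.pyRange_one_succ_right h1, List.foldl_append, List.foldl_append, ih]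
      simp only [List.foldl, pvB_step, pvA_step]
      have hw : pvA_inner prevV (PySem.List.pyGetD batteries (L - 1 + ((k : Int) + 1)) 0) (L - 2)
            (L - 1 + ((k : Int) + 1))
          = max 0 (pvW (fun i => PySem.List.pyGetD prevV i 0) (L - 1) (k + 1) * 10
              + PySem.List.pyGetD batteries (L - 1 + ((k : Int) + 1)) 0) := by
        have h0 : (L : Int) - 2 = (L - 1) - 1 := by ring
        have h1 : (L : Int) - 1 + ((k : Int) + 1) = (L - 1) + (((k : Nat) + 1 : Nat) : Int) := by
          push_cast; ring
        rw [h0, h1, ← pvA_inner_eq]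
      rw [hw]
      have hwin : ((L : Int) - 1) + ((k : Int) + 1) - 1 = (L - 1) + (k : Int) := by ring
      simp only [pvW, hwin]

theorem pv_len_eq (batteries prevV : List Int) (m L : Int) :
    pvA_len batteries prevV m L = pvB_len batteries prevV m L := by
  by_cases hm : m ≤ L - 1
  · rw [pvA_len, pvB_len, PySem.List.pyRange_one_eq_nil hm]
    simp
  · have hk : m = L - 1 + (((m - L).toNat : Int) + 1) := by omega
    rw [pvA_len, pvB_len, hk, pvB_fold_eq]

-- ===== VERDICT (by name: the statement is the Claim_ definition above) =====
theorem largest_concatenation_subsequence_spec : Claim_equal_largest_concatenation_subsequence := by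
  intro batteries n _ _
  unfold Spec_largest_concatenation_subsequence
  unfold largest_concatenation_subsequence largest_concatenation_subsequence_alt
  have h : (fun prevV L => pvA_len batteries prevV (PySem.List.len batteries) L)
      = (fun prevV L => pvB_len batteries prevV (PySem.List.len batteries) L) := by
    funext p L
    exact pv_len_eq batteries p (PySem.List.len batteries) L
  simp only [h]
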